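-- pv_equiv track=rewrite | github.com/g07oct2004-hash/Client_Finder_AI | project_2.py | detect_need
-- ===== SOURCE A (Python) =====
-- def detect_need(text):
--     t = text.lower()
--
--     if any(k in t for k in ["migration", "migrate", "transition", "move from"]):
--         return "CRM Migration"
--
--     if any(k in t for k in ["optimize", "optimization", "performance", "improve"]):
--         return "Salesforce Optimization"
--
--     if any(k in t for k in ["integration", "api", "erp", "sap", "oracle"]):
--         return "System Integration"
--
--     if any(k in t for k in ["admin", "support", "managed services"]):
--         return "Ongoing Salesforce Support"
--
--     return "Salesforce Expansion"
-- ===== SOURCE B (Python) =====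
-- _PRIORITY = {
--     "migration": 0, "migrate": 0, "transition": 0, "move from": 0,
--     "optimize": 1, "optimization": 1, "performance": 1, "improve": 1,
--     "integration": 2, "api": 2, "erp": 2, "sap": 2, "oracle": 2,
--     "admin": 3, "support": 3, "managed services": 3,
-- }
-- _LABELS = ["CRM Migration", "Salesforce Optimization", "System Integration",
--            "Ongoing Salesforce Support", "Salesforce Expansion"]
--
-- def detect_need(text):
--     t = text.lower()
--     best = min((p for k, p in _PRIORITY.items() if k in t), default=4)
--     return _LABELS[best]
-- ===== Notes on version B (the rewrite author's own statement) =====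
-- stated objective: alternative
-- what changed: Instead of an ordered early-return branch chain, B scores all 16 keywords exhaustively against the text, aggregates the matches with a numeric minimum-priority accumulator, and indexes a label table with the result; priority order replaces control-flow order.
import Mathlib
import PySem

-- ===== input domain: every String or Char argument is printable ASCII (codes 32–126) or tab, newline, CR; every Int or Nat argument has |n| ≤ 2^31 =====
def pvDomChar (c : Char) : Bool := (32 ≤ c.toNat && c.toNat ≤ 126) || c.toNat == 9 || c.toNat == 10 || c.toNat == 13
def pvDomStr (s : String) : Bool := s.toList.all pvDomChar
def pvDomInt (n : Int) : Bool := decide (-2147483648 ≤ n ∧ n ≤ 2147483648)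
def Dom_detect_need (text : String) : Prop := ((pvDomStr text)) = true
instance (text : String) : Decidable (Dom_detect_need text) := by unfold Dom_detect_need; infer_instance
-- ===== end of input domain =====

-- B replaces A's ordered early-return branch chain by exhaustive keyword scoring:
-- every keyword match contributes its priority, a min-accumulator aggregates, a label table is indexed.

-- ===== PORT A =====
def detect_need (text : String) : String :=
  let t := PySem.Str.lower text
  if (["migration", "migrate", "transition", "move from"]).any (fun k => PySem.Str.isIn k t) then
    "CRM Migration"
  else if (["optimize", "optimization", "performance", "improve"]).any (fun k => PySem.Str.isIn k t) then
    "Salesforce Optimization"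
  else if (["integration", "api", "erp", "sap", "oracle"]).any (fun k => PySem.Str.isIn k t) then
    "System Integration"
  else if (["admin", "support", "managed services"]).any (fun k => PySem.Str.isIn k t) then
    "Ongoing Salesforce Support"
  else
    "Salesforce Expansion"

-- ===== PORT B =====
def needPriority : List (String × Nat) :=
  [("migration", 0), ("migrate", 0), ("transition", 0), ("move from", 0),
   ("optimize", 1), ("optimization", 1), ("performance", 1), ("improve", 1),
   ("integration", 2), ("api", 2), ("erp", 2), ("sap", 2), ("oracle", 2),
   ("admin", 3), ("support", 3), ("managed services", 3)]

def needLabels : List String :=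
  ["CRM Migration", "Salesforce Optimization", "System Integration",
   "Ongoing Salesforce Support", "Salesforce Expansion"]

def detect_need_alt (text : String) : String :=
  let t := PySem.Str.lower text
  -- min over the generator (p for k,p in _PRIORITY.items() if k in t) with default=4
  let best : Nat := needPriority.foldl (fun m p => if PySem.Str.isIn p.1 t then min m p.2 else m) 4
  -- _LABELS[best] (best ≤ 4, always in range)
  match PySem.List.pyGet? needLabels (best : Int) with
  | some s => s
  | none => ""

-- ===== PRECONDITION & SPEC =====
def Spec_detect_need (text : String) (out : String) : Prop := out = detect_need_alt text
instance (text : String) (out : String) : Decidable (Spec_detect_need text out) := by unfold Spec_detect_need; infer_instance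

-- ===== CLAIM (what is proved, stated in full; the proofs are below) =====
def Claim_equal_detect_need : Prop := ∀ (text : String), Dom_detect_need text → Spec_detect_need text (detect_need text)

-- ===== LEMMAS AND PROOFS =====

-- The min-accumulator fold over one constant-priority keyword segment equals one group test.
theorem fold_const_prio (t : String) (c : Nat) (ks : List String) (m : Nat) :
    ((ks.map (fun k => (k, c))).foldl
        (fun m p => if PySem.Str.isIn p.1 t then min m p.2 else m) m)
      = if ks.any (fun k => PySem.Str.isIn k t) then min m c else m := by
  induction ks generalizing m with
  | nil => rfl
  | cons k ks ih =>
    simp only [List.map_cons, List.foldl_cons, List.any_cons]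
    rw [ih]
    rcases Bool.eq_false_or_eq_true (PySem.Str.isIn k t) with hh | hh <;>
      rcases Bool.eq_false_or_eq_true (ks.any fun k => PySem.Str.isIn k t) with ha | ha <;>
        simp only [hh, ha] <;> simp

-- needPriority decomposed into its four constant-priority groups.
theorem needPriority_eq :
    needPriority =
      (["migration", "migrate", "transition", "move from"].map (fun k => (k, 0)))
      ++ (["optimize", "optimization", "performance", "improve"].map (fun k => (k, 1)))
      ++ (["integration", "api", "erp", "sap", "oracle"].map (fun k => (k, 2)))
      ++ (["admin", "support", "managed services"].map (fun k => (k, 3))) := by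
  rfl

-- Both sides as a function of the four group-match booleans.
theorem core (g0 g1 g2 g3 : Bool) :
    (if g0 then "CRM Migration"
     else if g1 then "Salesforce Optimization"
     else if g2 then "System Integration"
     else if g3 then "Ongoing Salesforce Support"
     else "Salesforce Expansion") =
    (match PySem.List.pyGet? needLabels
        (((if g3 then min (if g2 then min (if g1 then min (if g0 then min 4 0 else 4) 1
              else (if g0 then min 4 0 else 4)) 2
            else (if g1 then min (if g0 then min 4 0 else 4) 1 else (if g0 then min 4 0 else 4))) 3
          else (if g2 then min (if g1 then min (if g0 then min 4 0 else 4) 1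
              else (if g0 then min 4 0 else 4)) 2
            else (if g1 then min (if g0 then min 4 0 else 4) 1
              else (if g0 then min 4 0 else 4)))) : Nat) : Int) with
     | some s => s
     | none => "") := by
  cases g0 <;> cases g1 <;> cases g2 <;> cases g3 <;> rfl

-- ===== VERDICT (by name: the statement is the Claim_ definition above) =====
theorem detect_need_spec : Claim_equal_detect_need := by
  intro text _
  unfold Spec_detect_need detect_need detect_need_alt
  rw [needPriority_eq]
  simp only [List.foldl_append, fold_const_prio]
  exact core _ _ _ _
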